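-- pv_equiv track=rewrite | github.com/akhilkarra/python-lab | src/cmu/15112/sudoku-term-project/sudokuSolver.py | areLegalValues
-- ===== SOURCE A (Python) =====
-- def areLegalValues(L):
--     n = len(L)
--     seen = set()
--     for value in L:
--         if not isinstance(value, int):
--             return False
--         if value < 0 or value > n:
--             return False
--         if value != 0 and value in seen:
--             return False
--         seen.add(value)
--     return True
-- ===== SOURCE B (Python) =====
-- def areLegalValues(L):
--     n = len(L)
--     if any(not isinstance(v, int) or v < 0 or v > n for v in L):
--         return False
--     counts = [0] * (n + 1)
--     for v in L:
--         counts[v] += 1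
--     return all(c <= 1 for c in counts[1:])
-- ===== Notes on version B (the rewrite author's own statement) =====
-- stated objective: alternative
-- what changed: Replaces A's single loop with an incremental 'seen' set membership test by a counting-array (bucket) algorithm: a validation pass, then a bucket count of each value into a list of n+1 counters, then a check that every nonzero bucket holds at most 1.
import Mathlib
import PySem

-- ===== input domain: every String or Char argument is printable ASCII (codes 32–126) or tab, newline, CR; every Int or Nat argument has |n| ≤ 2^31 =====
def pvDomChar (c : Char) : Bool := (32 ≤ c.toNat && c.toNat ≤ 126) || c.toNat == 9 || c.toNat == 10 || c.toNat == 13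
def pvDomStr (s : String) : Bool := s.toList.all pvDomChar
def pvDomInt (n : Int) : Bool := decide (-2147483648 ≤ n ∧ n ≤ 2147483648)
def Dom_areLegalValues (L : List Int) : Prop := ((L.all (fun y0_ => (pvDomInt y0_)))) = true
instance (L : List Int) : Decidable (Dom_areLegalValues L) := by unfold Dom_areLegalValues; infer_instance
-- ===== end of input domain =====

-- B replaces A's incremental seen-set loop by a counting array: one range-validation
-- pass, then a bucket count of each value, then a check that no nonzero bucket
-- exceeds 1; objective: alternative (no set, different data structure).

-- ===== PORT A =====
-- the for-loop over L with the accumulating 'seen' set; the isinstance check is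
-- trivially true under the List Int type convention
def areLegalValuesGo (n : Int) : List Int → PySem.Set Int → Bool
  | [], _ => true
  | v :: rest, seen =>
    if v < 0 ∨ v > n then false
    else if v ≠ 0 ∧ seen.contains v = true then false
    else areLegalValuesGo n rest (seen.add v)

def areLegalValues (L : List Int) : Bool :=
  areLegalValuesGo (L.length : Int) L PySem.Set.empty

-- ===== PORT B =====
-- counts[v] += 1: v.toNat is exact here because this line only runs after the
-- validation pass established 0 <= v <= n; counts[1:] is List.drop 1 (slice from 1 ≥ 0)
def areLegalValues_alt (L : List Int) : Bool :=
  let n : Int := L.length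
  if L.any (fun v => decide (v < 0 ∨ v > n)) then false
  else
    let counts := L.foldl (fun c v => c.modify v.toNat (· + 1))
      (List.replicate (L.length + 1) (0 : Int))
    (counts.drop 1).all (fun c => decide (c ≤ 1))

-- ===== PRECONDITION & SPEC =====
def Spec_areLegalValues (L : List Int) (out : Bool) : Prop := out = areLegalValues_alt L
instance (L : List Int) (out : Bool) : Decidable (Spec_areLegalValues L out) := by unfold Spec_areLegalValues; infer_instance

-- ===== CLAIM (what is proved, stated in full; the proofs are below) =====
def Claim_equal_areLegalValues : Prop := ∀ (L : List Int), Dom_areLegalValues L → Spec_areLegalValues L (areLegalValues L)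

-- ===== LEMMAS AND PROOFS =====

-- loop invariant for A's traversal: the loop succeeds iff every value is in range and
-- the nonzero values are pairwise distinct and disjoint from 'seen'
lemma go_spec (n : Int) (L : List Int) : ∀ (seen : PySem.Set Int),
    areLegalValuesGo n L seen =
      ((L.all fun v => decide (0 ≤ v ∧ v ≤ n)) &&
       decide ((L.filter (fun v => v ≠ 0)).Nodup ∧ ∀ v ∈ L, v ≠ 0 → v ∉ seen)) := by
  induction L with
  | nil => intro seen; simp [areLegalValuesGo]
  | cons v rest ih =>
    intro seen
    by_cases h1 : v < 0 ∨ v > n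
    · have hne : ¬ (0 ≤ v ∧ v ≤ n) := by omega
      have lhs : areLegalValuesGo n (v :: rest) seen = false := by
        simp only [areLegalValuesGo]
        rw [if_pos h1]
      rw [lhs]
      simp [hne]
    · have hr : 0 ≤ v ∧ v ≤ n := by omega
      by_cases h2 : v ≠ 0 ∧ seen.contains v = true
      · have hv : v ∈ seen := by
          have := h2.2
          simpa [PySem.Set.contains, List.contains_iff_mem] using this
        have hnot : ¬ ((((v :: rest).filter (fun v => v ≠ 0)).Nodup) ∧
            ∀ w ∈ v :: rest, w ≠ 0 → w ∉ seen) := by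
          rintro ⟨-, hall⟩
          exact hall v (List.mem_cons_self) h2.1 hv
        have lhs : areLegalValuesGo n (v :: rest) seen = false := by
          simp only [areLegalValuesGo]
          rw [if_neg h1, if_pos h2]
        rw [lhs, decide_eq_false hnot]
        simp
      · have step : areLegalValuesGo n (v :: rest) seen
            = areLegalValuesGo n rest (seen.add v) := by
          simp only [areLegalValuesGo]
          rw [if_neg h1, if_neg h2]
        rw [step, ih (seen.add v)]
        by_cases hv0 : v = 0
        · subst hv0
          have hiff : ((rest.filter (fun v => v ≠ 0)).Nodup ∧
                ∀ w ∈ rest, w ≠ 0 → w ∉ PySem.Set.add seen 0) ↔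
              (((0 :: rest).filter (fun v : Int => v ≠ 0)).Nodup ∧
                ∀ w ∈ (0 : Int) :: rest, w ≠ 0 → w ∉ seen) := by
            constructor
            · rintro ⟨hnd, hall⟩
              refine ⟨by simpa using hnd, ?_⟩
              intro w hw hw0 hws
              rcases List.mem_cons.mp hw with h | h
              · exact hw0 h
              · exact hall w h hw0 ((PySem.Set.mem_add seen 0 w).mpr (Or.inl hws))
            · rintro ⟨hnd, hall⟩
              refine ⟨by simpa using hnd, ?_⟩
              intro w hw hw0 hws
              rcases (PySem.Set.mem_add seen 0 w).mp hws with h | h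
              · exact hall w (List.mem_cons_of_mem _ hw) hw0 h
              · exact hw0 h
          rw [decide_eq_decide.mpr hiff]
          have hc : decide ((0:Int) ≤ 0 ∧ (0:Int) ≤ n) = true := decide_eq_true hr
          rw [List.all_cons, hc, Bool.true_and]
        · have hvs : v ∉ seen := by
            intro hv
            exact h2 ⟨hv0, by simpa [PySem.Set.contains, List.contains_iff_mem] using hv⟩
          have hiff : ((rest.filter (fun v => v ≠ 0)).Nodup ∧
                ∀ w ∈ rest, w ≠ 0 → w ∉ PySem.Set.add seen v) ↔
              ((((v :: rest).filter (fun v : Int => v ≠ 0)).Nodup) ∧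
                ∀ w ∈ v :: rest, w ≠ 0 → w ∉ seen) := by
            rw [List.filter_cons_of_pos (by simpa using hv0), List.nodup_cons]
            constructor
            · rintro ⟨hnd, hall⟩
              refine ⟨⟨?_, hnd⟩, ?_⟩
              · intro hvf
                rcases List.mem_filter.mp hvf with ⟨hvr, -⟩
                exact hall v hvr hv0 ((PySem.Set.mem_add seen v v).mpr (Or.inr rfl))
              · intro w hw hw0 hws
                rcases List.mem_cons.mp hw with h | h
                · subst h; exact hvs hws
                · exact hall w h hw0 ((PySem.Set.mem_add seen v w).mpr (Or.inl hws))
            · rintro ⟨⟨hvf, hnd⟩, hall⟩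
              refine ⟨hnd, ?_⟩
              intro w hw hw0 hws
              rcases (PySem.Set.mem_add seen v w).mp hws with h | h
              · exact hall w (List.mem_cons_of_mem _ hw) hw0 h
              · subst h
                exact hvf (List.mem_filter.mpr ⟨hw, by simpa using hw0⟩)
          rw [decide_eq_decide.mpr hiff]
          have hc : decide (0 ≤ v ∧ v ≤ n) = true := decide_eq_true hr
          rw [List.all_cons, hc, Bool.true_and]

-- B's counting loop: bucket j of the folded counts holds its start value plus the
-- number of occurrences of j in L (all values of L being nonnegative)
lemma foldl_bump_getElem? (L : List Int) (hL : ∀ v ∈ L, 0 ≤ v) :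
    ∀ (c0 : List Int) (j : Nat),
      (L.foldl (fun c v => c.modify v.toNat (· + 1)) c0)[j]?
        = c0[j]?.map (· + (L.count (j : Int) : Int)) := by
  induction L with
  | nil => intro c0 j; cases h : c0[j]? <;> simp [h]
  | cons v rest ih =>
    intro c0 j
    have hv : 0 ≤ v := hL v (List.mem_cons_self)
    have hrest : ∀ w ∈ rest, 0 ≤ w := fun w hw => hL w (List.mem_cons_of_mem _ hw)
    rw [List.foldl_cons, ih hrest]
    rw [List.getElem?_modify]
    by_cases hj : v.toNat = j
    · have hvj : v = (j : Int) := by omega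
      have hcnt : (v :: rest).count (j : Int) = rest.count (j : Int) + 1 := by
        rw [List.count_cons]
        simp [hvj]
      cases h : c0[j]?
      · simp [hj, hcnt]
      · simp [hj, hcnt]
        omega
    · have hvj : v ≠ (j : Int) := by omega
      have hcnt : (v :: rest).count (j : Int) = rest.count (j : Int) := by
        rw [List.count_cons]
        simp [hvj]
      cases h : c0[j]? <;> simp [hj, hcnt]

-- ===== VERDICT (by name: the statement is the Claim_ definition above) =====
theorem areLegalValues_spec : Claim_equal_areLegalValues := by
  intro L _
  show areLegalValues L = areLegalValues_alt L
  simp only [areLegalValues, areLegalValues_alt]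
  rw [go_spec]
  by_cases hall : ∀ v ∈ L, 0 ≤ v ∧ v ≤ (L.length : Int)
  · have hA : (L.all fun v => decide (0 ≤ v ∧ v ≤ (L.length : Int))) = true := by
      simp only [List.all_eq_true, decide_eq_true_eq]; exact hall
    have hB : (L.any fun v => decide (v < 0 ∨ v > (L.length : Int))) = false := by
      simp only [List.any_eq_false, decide_eq_true_eq]
      intro v hv
      have := hall v hv
      omega
    rw [hA, hB, Bool.true_and, if_neg (by simp)]
    -- both sides now say: the nonzero values of L are pairwise distinct
    have hcnt : ∀ j : Nat,
        (L.foldl (fun c v => c.modify v.toNat (· + 1))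
          (List.replicate (L.length + 1) (0 : Int)))[j]?
          = (List.replicate (L.length + 1) (0 : Int))[j]?.map
              (· + (L.count (j : Int) : Int)) :=
      fun j => foldl_bump_getElem? L (fun v hv => (hall v hv).1) _ j
    have hiff : ((L.filter (fun v => v ≠ 0)).Nodup ∧
          ∀ v ∈ L, v ≠ 0 → v ∉ (PySem.Set.empty : PySem.Set Int)) ↔
        (∀ x ∈ (L.foldl (fun c v => c.modify v.toNat (· + 1))
            (List.replicate (L.length + 1) (0 : Int))).drop 1, x ≤ 1) := by
      have hempty : ∀ v ∈ L, v ≠ 0 → v ∉ (PySem.Set.empty : PySem.Set Int) := by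
        intro v _ _ hv; simp [PySem.Set.empty] at hv
      rw [List.nodup_iff_count_le_one]
      constructor
      · rintro ⟨hnd, -⟩
        intro x hx
        rcases List.mem_iff_getElem?.mp hx with ⟨i, hi⟩
        rw [List.getElem?_drop] at hi
        rw [hcnt (1 + i)] at hi
        rcases h : (List.replicate (L.length + 1) (0 : Int))[1 + i]? with _ | c
        · rw [h] at hi; simp at hi
        · rw [h] at hi
          have hc0 : c = 0 := by
            rw [List.getElem?_replicate] at h
            split at h
            · exact (Option.some.inj h).symm
            · exact absurd h (by simp)
          simp only [Option.map_some, Option.some.injEq] at hi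
          subst hc0
          have := hnd ((1 + i : Nat) : Int)
          have hcf : (L.filter (fun v => v ≠ 0)).count ((1 + i : Nat) : Int)
              = L.count ((1 + i : Nat) : Int) := by
            apply List.count_filter
            simp; omega
          rw [hcf] at this
          omega
      · intro hle
        refine ⟨?_, hempty⟩
        intro a
        by_cases ha0 : a = 0
        · subst ha0
          have : (0 : Int) ∉ L.filter (fun v => v ≠ 0) := by simp
          rw [List.count_eq_zero.mpr this]; omega
        · have hcf : (L.filter (fun v => v ≠ 0)).count a = L.count a := by
            apply List.count_filter; simpa using ha0
          rw [hcf]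
          by_cases hmem : a ∈ L
          · have hr := hall a hmem
            have ha1 : 1 ≤ a := by omega
            -- a = 1 + i for some i with 1 + i < L.length + 1
            obtain ⟨i, hia, hilt⟩ : ∃ i : Nat, a = ((1 + i : Nat) : Int) ∧
                1 + i < L.length + 1 := by
              refine ⟨a.toNat - 1, by omega, by omega⟩
            have hrep : (List.replicate (L.length + 1) (0 : Int))[1 + i]?
                = some 0 := by rw [List.getElem?_replicate, if_pos hilt]
            have hx : (L.foldl (fun c v => c.modify v.toNat (· + 1))
                (List.replicate (L.length + 1) (0 : Int)))[1 + i]?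
                = some ((L.count ((1 + i : Nat) : Int) : Int)) := by
              rw [hcnt (1 + i), hrep]; simp
            have hmemd : ((L.count ((1 + i : Nat) : Int) : Int)) ∈
                (L.foldl (fun c v => c.modify v.toNat (· + 1))
                  (List.replicate (L.length + 1) (0 : Int))).drop 1 :=
              List.mem_iff_getElem?.mpr ⟨i, by rw [List.getElem?_drop]; exact hx⟩
            have := hle _ hmemd
            rw [hia]
            omega
          · rw [List.count_eq_zero.mpr hmem]; omega
    rw [Bool.eq_iff_iff]
    simp only [decide_eq_true_eq, List.all_eq_true]
    exact hiff
  · have hA : (L.all fun v => decide (0 ≤ v ∧ v ≤ (L.length : Int))) = false := by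
      simp only [List.all_eq_false]
      push Not at hall
      rcases hall with ⟨v, hv, hr⟩
      exact ⟨v, hv, by simpa using hr⟩
    have hB : (L.any fun v => decide (v < 0 ∨ v > (L.length : Int))) = true := by
      simp only [List.any_eq_true]
      push Not at hall
      rcases hall with ⟨v, hv, hr⟩
      exact ⟨v, hv, by simp; omega⟩
    rw [hA, hB, Bool.false_and, if_pos rfl]
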